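-- pv_equiv track=rewrite | github.com/andrasfe/war_rig | citadel/src/citadel/sdk.py | _trim_trailing_cobol_comments
-- ===== SOURCE A (Python) =====
-- def _trim_trailing_cobol_comments(lines: list[str]) -> list[str]:
--     """
--     Trim trailing comment-only lines from COBOL paragraph body.
--
--     COBOL paragraphs often have comment header blocks like:
--     *----------------------------------------------------------------*
--     *                      PARAGRAPH-NAME
--     *----------------------------------------------------------------*
--
--     These belong to the NEXT paragraph, not the current one.
--     """
--     if not lines:
--         return lines
--
--     # Find the last non-comment, non-blank line
--     last_content_idx = len(lines) - 1
--
--     while last_content_idx >= 0: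
--         line = lines[last_content_idx]
--         stripped = line.strip()
--
--         # Empty line - continue checking
--         if not stripped:
--             last_content_idx -= 1
--             continue
--
--         # Check if it's a comment line (column 7 has * or /)
--         if len(line) >= 7 and line[6] in ("*", "/"):
--             last_content_idx -= 1
--             continue
--
--         # Found a non-comment, non-blank line - stop here
--         break
--
--     # Return lines up to and including the last content line
--     return lines[: last_content_idx + 1]
-- ===== SOURCE B (Python) =====
-- def _trim_trailing_cobol_comments(lines: list[str]) -> list[str]:
--     def is_content(line: str) -> bool:
--         return bool(line.strip()) and not (len(line) >= 7 and line[6] in ("*", "/"))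
--
--     last = -1
--     for i, line in enumerate(lines):
--         if is_content(line):
--             last = i
--     return lines[: last + 1]
-- ===== Notes on version B (the rewrite author's own statement) =====
-- stated objective: simpler
-- what changed: Replaces A's backward while-loop with index decrements by a single forward enumerate pass that tracks the index of the last content line via an extracted is_content predicate, then slices once; no empty-list special case needed.
import Mathlib
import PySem

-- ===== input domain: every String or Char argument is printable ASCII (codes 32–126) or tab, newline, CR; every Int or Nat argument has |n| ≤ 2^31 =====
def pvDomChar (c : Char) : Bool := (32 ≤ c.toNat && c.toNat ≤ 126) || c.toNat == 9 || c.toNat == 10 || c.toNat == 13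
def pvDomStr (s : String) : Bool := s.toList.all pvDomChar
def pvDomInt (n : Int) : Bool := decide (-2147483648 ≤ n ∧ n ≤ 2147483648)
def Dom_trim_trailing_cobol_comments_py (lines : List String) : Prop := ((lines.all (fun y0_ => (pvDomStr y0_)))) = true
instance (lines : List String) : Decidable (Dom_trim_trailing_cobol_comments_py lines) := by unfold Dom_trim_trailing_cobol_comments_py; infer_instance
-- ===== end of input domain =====

-- B replaces A's backward while-loop by one forward pass tracking the last content index (simpler decomposition).

-- ===== PORT A =====
-- A's while-loop: last_content_idx runs len-1, len-2, …; parameter n is last_content_idx + 1.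
def pvTrimLoopA (lines : List String) : Nat → Int
  | 0 => -1
  | n + 1 =>
    let line := PySem.List.pyGetD lines (n : Int) ""
    let stripped := PySem.Str.strip line
    if stripped = "" then pvTrimLoopA lines n
    else if 7 ≤ PySem.Str.len line ∧
            (PySem.Str.pyGet? line 6 = some '*' ∨ PySem.Str.pyGet? line 6 = some '/') then
      pvTrimLoopA lines n
    else (n : Int)

def trim_trailing_cobol_comments_py (lines : List String) : List String :=
  if lines = [] then lines
  else PySem.List.slice lines none (some (pvTrimLoopA lines lines.length + 1))

-- ===== PORT B =====
def pvIsContent (line : String) : Bool :=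
  !(PySem.Str.strip line == "") &&
    !(decide (7 ≤ PySem.Str.len line) &&
      (PySem.Str.pyGet? line 6 == some '*' || PySem.Str.pyGet? line 6 == some '/'))

def trim_trailing_cobol_comments_py_alt (lines : List String) : List String :=
  let last := (PySem.List.enumerate lines 0).foldl
    (fun acc p => if pvIsContent p.2 then p.1 else acc) (-1)
  PySem.List.slice lines none (some (last + 1))

-- ===== PRECONDITION & SPEC =====
def Spec_trim_trailing_cobol_comments_py (lines : List String) (out : List String) : Prop := out = trim_trailing_cobol_comments_py_alt lines
instance (lines : List String) (out : List String) : Decidable (Spec_trim_trailing_cobol_comments_py lines out) := by unfold Spec_trim_trailing_cobol_comments_py; infer_instance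

-- ===== CLAIM (what is proved, stated in full; the proofs are below) =====
def Claim_equal_trim_trailing_cobol_comments_py : Prop := ∀ (lines : List String), Dom_trim_trailing_cobol_comments_py lines → Spec_trim_trailing_cobol_comments_py lines (trim_trailing_cobol_comments_py lines)

-- ===== LEMMAS AND PROOFS =====

-- A's loop only looks at indices below n, so a suffix does not matter.
theorem pvTrimLoopA_append (l ys : List String) :
    ∀ n, n ≤ l.length → pvTrimLoopA (l ++ ys) n = pvTrimLoopA l n := by
  intro n
  induction n with
  | zero => intro _; rfl
  | succ m ih =>
    intro hm
    have hget : PySem.List.pyGetD (l ++ ys) (m : Int) "" = PySem.List.pyGetD l (m : Int) "" := by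
      simp [PySem.List.pyGetD_natCast, List.getD, List.getElem?_append_left (by omega : m < l.length)]
    simp only [pvTrimLoopA, hget]
    have ih' := ih (by omega)
    split_ifs <;> simp [ih']

theorem pvIsContent_iff (x : String) :
    pvIsContent x = true ↔
      (PySem.Str.strip x ≠ "" ∧
        ¬(7 ≤ PySem.Str.len x ∧
          (PySem.Str.pyGet? x 6 = some '*' ∨ PySem.Str.pyGet? x 6 = some '/'))) := by
  simp only [pvIsContent, Bool.and_eq_true, Bool.not_eq_true', beq_eq_false_iff_ne, ne_eq,
    Bool.and_eq_false_iff, decide_eq_false_iff_not, Bool.or_eq_false_iff, not_le]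
  constructor
  · rintro ⟨h1, h2⟩
    refine ⟨h1, ?_⟩
    rintro ⟨h7, h | h⟩
    · rcases h2 with h2 | ⟨h2, _⟩
      · omega
      · exact h2 h
    · rcases h2 with h2 | ⟨_, h2⟩
      · omega
      · exact h2 h
  · rintro ⟨h1, h2⟩
    refine ⟨h1, ?_⟩
    by_cases h7 : 7 ≤ PySem.Str.len x
    · exact Or.inr ⟨fun h => h2 ⟨h7, Or.inl h⟩, fun h => h2 ⟨h7, Or.inr h⟩⟩
    · exact Or.inl (by omega)

-- the fold step of B
theorem pvFold_append (l : List String) (x : String) (init : Int) :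
    (PySem.List.enumerate (l ++ [x]) 0).foldl
        (fun acc p => if pvIsContent p.2 then p.1 else acc) init
      = (if pvIsContent x then ((l.length : Int)) else
          (PySem.List.enumerate l 0).foldl
            (fun acc p => if pvIsContent p.2 then p.1 else acc) init) := by
  rw [PySem.List.enumerate_append]
  simp [PySem.List.enumerate_cons, List.foldl_append]

-- main invariant: A's loop result = B's fold result
theorem pvLoop_eq_fold (lines : List String) :
    pvTrimLoopA lines lines.length
      = (PySem.List.enumerate lines 0).foldl
          (fun acc p => if pvIsContent p.2 then p.1 else acc) (-1) := by
  induction lines using List.reverseRecOn with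
  | nil => rfl
  | append_singleton l x ih =>
    rw [pvFold_append]
    have hlen : (l ++ [x]).length = l.length + 1 := by simp
    rw [hlen]
    have hget : PySem.List.pyGetD (l ++ [x]) (l.length : Int) "" = x := by
      simp [PySem.List.pyGetD_natCast, List.getD]
    simp only [pvTrimLoopA, hget]
    have hpre := pvTrimLoopA_append l [x] l.length le_rfl
    by_cases hcont : pvIsContent x = true
    · obtain ⟨hs, hc⟩ := (pvIsContent_iff x).mp hcont
      rw [if_neg hs, if_neg hc, if_pos hcont]
    · have h : PySem.Str.strip x ≠ "" →
          (7 ≤ PySem.Str.len x ∧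
            (PySem.Str.pyGet? x 6 = some '*' ∨ PySem.Str.pyGet? x 6 = some '/')) := by
        intro hs
        by_contra hc
        exact hcont ((pvIsContent_iff x).mpr ⟨hs, hc⟩)
      rw [if_neg hcont]
      by_cases hs : PySem.Str.strip x = ""
      · rw [if_pos hs, hpre, ih]
      · rw [if_neg hs, if_pos (h hs), hpre, ih]

-- ===== VERDICT (by name: the statement is the Claim_ definition above) =====
theorem trim_trailing_cobol_comments_py_spec : Claim_equal_trim_trailing_cobol_comments_py := by
  intro lines _
  unfold Spec_trim_trailing_cobol_comments_py trim_trailing_cobol_comments_py trim_trailing_cobol_comments_py_alt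
  by_cases h : lines = []
  · subst h; rfl
  · simp only [h, if_false, pvLoop_eq_fold]
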